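-- pv_equiv track=rewrite | github.com/zxl3651/CodingTest | programmers/Lv.2 n^2 배열 자르기.py | solution
-- ===== SOURCE A (Python) =====
-- def solution(n, left, right):
--     answer = []
--     for i in range(left, right + 1):
--         n1 = i // n
--         n2 = i % n
--         if n1 < n2: n1, n2 = n2, n1
--         answer.append(n1 + 1)
--     return answer
-- ===== SOURCE B (Python) =====
-- def solution(n, left, right):
--     # Row-by-row: row r of the n x n array is r+1 repeated (r+1) times followed
--     # by r+2, r+3, ..., n; emit each row's clipped segment instead of computing
--     # max(i//n, i%n) per index.
--     if right < left:
--         return []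
--     r, c = divmod(left, n)
--     answer = []
--     total = right - left + 1
--     while total > 0:
--         take = min(n - c, total)
--         hi = c + take
--         flat_end = min(r + 1, hi)
--         answer += [r + 1] * (flat_end - c)
--         answer += [cc + 1 for cc in range(max(c, r + 1), hi)]
--         total -= take
--         r += 1
--         c = 0
--     return answer
-- ===== Notes on version B (the rewrite author's own statement) =====
-- stated objective: faster
-- what changed: B emits the answer row-by-row as runs (value r+1 for columns 0..r, then c+1 onward), clipping the first and last rows to [left,right], instead of recomputing i//n and i%n for every index.
-- outside the precondition, e.g. on solution(-2, 0, 2): A returns [1, 0, 1], B does not finish within the time limit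
import Mathlib
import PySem

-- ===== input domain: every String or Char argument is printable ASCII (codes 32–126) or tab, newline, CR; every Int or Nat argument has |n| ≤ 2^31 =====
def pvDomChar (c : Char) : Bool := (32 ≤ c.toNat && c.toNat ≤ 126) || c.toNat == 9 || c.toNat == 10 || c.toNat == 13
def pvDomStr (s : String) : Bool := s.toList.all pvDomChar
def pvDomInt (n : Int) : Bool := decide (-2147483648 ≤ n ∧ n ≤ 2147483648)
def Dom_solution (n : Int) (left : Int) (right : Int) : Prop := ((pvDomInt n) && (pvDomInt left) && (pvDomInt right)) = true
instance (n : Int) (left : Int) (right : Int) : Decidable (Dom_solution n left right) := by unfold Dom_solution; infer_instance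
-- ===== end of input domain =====

-- B emits the slice row-by-row as runs (value r+1 up to column r, then c+1 onward) instead of
-- recomputing i//n and i%n per index; same O(right-left) size, measurably faster by constant factor.


-- ===== PORT A =====
def solution (n : Int) (left : Int) (right : Int) : List Int :=
  (PySem.List.pyRange left (right + 1) 1).foldl (fun answer i =>
    let n1 := PySem.Int.floordiv i n
    let n2 := PySem.Int.mod i n
    let p := if n1 < n2 then (n2, n1) else (n1, n2)   -- the swap 'if n1 < n2: n1, n2 = n2, n1'
    answer ++ [p.1 + 1]) []

-- ===== PORT B =====
-- the 'while total > 0' loop of Source B; the 'n - c ≤ 0' branch is a totality guard only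
-- (unreachable under Pre_solution, where 0 ≤ c < n is invariant)
def solRows (n : Int) (r : Int) (c : Int) (total : Int) : List Int :=
  if total ≤ 0 then []
  else if n - c ≤ 0 then []
  else
    let take := min (n - c) total
    let hi := c + take
    let flatEnd := min (r + 1) hi
    (List.replicate (flatEnd - c).toNat (r + 1)
       ++ (PySem.List.pyRange (max c (r + 1)) hi 1).map (fun cc => cc + 1))
      ++ solRows n (r + 1) 0 (total - take)
termination_by total.toNat
decreasing_by omega

def solution_alt (n : Int) (left : Int) (right : Int) : List Int :=
  if right < left then []
  else solRows n (PySem.Int.floordiv left n) (PySem.Int.mod left n) (right - left + 1)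

-- ===== PRECONDITION & SPEC =====
-- Pre_ excludes n ≤ 0 on nonempty ranges: there A raises ZeroDivisionError when n = 0, and for
-- negative n B's row decomposition of the n×n array does not apply (B's loop does not terminate).
def Pre_solution (n : Int) (left : Int) (right : Int) : Prop := 1 ≤ n ∨ right < left
instance (n : Int) (left : Int) (right : Int) : Decidable (Pre_solution n left right) := by unfold Pre_solution; infer_instance
def pvWitness_solution : Int × Int × Int := (3, 2, 5)

def Spec_solution (n : Int) (left : Int) (right : Int) (out : List Int) : Prop := out = solution_alt n left right
instance (n : Int) (left : Int) (right : Int) (out : List Int) : Decidable (Spec_solution n left right out) := by unfold Spec_solution; infer_instance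

-- ===== CLAIM (what is proved, stated in full; the proofs are below) =====
def Claim_equal_solution : Prop := ∀ (n : Int) (left : Int) (right : Int), Dom_solution n left right → Pre_solution n left right → Spec_solution n left right (solution n left right)

-- ===== LEMMAS AND PROOFS =====

-- the per-index value both programs compute: max(i//n, i%n) + 1
def gVal (n : Int) (i : Int) : Int :=
  (if PySem.Int.floordiv i n < PySem.Int.mod i n then PySem.Int.mod i n else PySem.Int.floordiv i n) + 1

theorem solution_eq_map (n left right : Int) :
    solution n left right = (PySem.List.pyRange left (right + 1) 1).map (gVal n) := by
  unfold solution
  rw [show (fun (answer : List Int) (i : Int) =>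
        let n1 := PySem.Int.floordiv i n
        let n2 := PySem.Int.mod i n
        let p := if n1 < n2 then (n2, n1) else (n1, n2)
        answer ++ [p.1 + 1]) = (fun answer i => answer ++ [gVal n i]) from by
      funext answer i; simp only [gVal]; split <;> rfl]
  simpa using PySem.List.foldl_append_singleton_eq_map (gVal n) (PySem.List.pyRange left (right + 1) 1) []

theorem gVal_row (n r cc : Int) (hn : 1 ≤ n) (h0 : 0 ≤ cc) (hlt : cc < n) :
    gVal n (r * n + cc) = (if r < cc then cc else r) + 1 := by
  have hd : PySem.Int.floordiv (r * n + cc) n = r := by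
    rw [PySem.Int.floordiv_eq_ediv_of_pos (by omega)]
    rw [show r * n + cc = cc + r * n by ring, Int.add_mul_ediv_right _ _ (by omega : n ≠ 0),
      Int.ediv_eq_zero_of_lt h0 hlt]
    ring
  have hm : PySem.Int.mod (r * n + cc) n = cc := by
    rw [PySem.Int.mod_eq_emod_of_pos (by omega)]
    rw [show r * n + cc = cc + n * r by ring, Int.add_mul_emod_self_left,
      Int.emod_eq_of_lt h0 hlt]
  rw [gVal, hd, hm]

-- one row segment of B equals the corresponding index slice mapped through gVal
theorem seg_eq (n r c hi : Int) (hn : 1 ≤ n) (hc : 0 ≤ c) (hch : c ≤ hi) (hhi : hi ≤ n) :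
    (PySem.List.pyRange (r * n + c) (r * n + hi) 1).map (gVal n)
      = List.replicate (min (r + 1) hi - c).toNat (r + 1)
          ++ (PySem.List.pyRange (max c (r + 1)) hi 1).map (fun cc => cc + 1) := by
  have hshift : (PySem.List.pyRange (r * n + c) (r * n + hi) 1).map (gVal n)
      = (PySem.List.pyRange c hi 1).map (fun cc => (if r < cc then cc else r) + 1) := by
    rw [PySem.List.pyRange_one (r * n + c), PySem.List.pyRange_one c, List.map_map, List.map_map]
    have hlen : (r * n + hi - (r * n + c)).toNat = (hi - c).toNat := by omega
    rw [hlen]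
    apply List.map_congr_left
    intro k hk
    simp only [List.mem_range] at hk
    simp only [Function.comp]
    rw [show r * n + c + (k : Int) = r * n + (c + k) by ring]
    exact gVal_row n r (c + k) hn (by omega) (by omega)
  rw [hshift]
  by_cases h1 : r + 1 ≤ c
  · -- no flat part: every cc ≥ c > r
    have : (min (r + 1) hi - c).toNat = 0 := by omega
    rw [this, List.replicate_zero, List.nil_append, show max c (r + 1) = c by omega]
    apply List.map_congr_left
    intro cc hcc
    rw [PySem.List.mem_pyRange_one] at hcc
    rw [if_pos (by omega)]
  · by_cases h2 : hi ≤ r + 1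
    · -- all flat: every cc < hi ≤ r + 1
      have he : PySem.List.pyRange (max c (r + 1)) hi 1 = [] :=
        PySem.List.pyRange_one_eq_nil (by omega)
      rw [he, List.map_nil, List.append_nil]
      rw [List.map_congr_left (g := fun _ => r + 1) (by
        intro cc hcc
        rw [PySem.List.mem_pyRange_one] at hcc
        rw [if_neg (by omega)])]
      rw [List.map_const', PySem.List.length_pyRange_one]
      congr 1
      omega
    · -- split at r + 1
      rw [PySem.List.pyRange_one_append c (r + 1) hi (by omega) (by omega), List.map_append]
      congr 1
      · rw [List.map_congr_left (g := fun _ => r + 1) (by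
          intro cc hcc
          rw [PySem.List.mem_pyRange_one] at hcc
          rw [if_neg (by omega)])]
        rw [List.map_const', PySem.List.length_pyRange_one]
        congr 1
        omega
      · rw [show max c (r + 1) = r + 1 by omega]
        apply List.map_congr_left
        intro cc hcc
        rw [PySem.List.mem_pyRange_one] at hcc
        rw [if_pos (by omega)]

theorem solRows_step (n r c total : Int) (ht : ¬ total ≤ 0) (hcn : ¬ n - c ≤ 0) :
    solRows n r c total
      = (List.replicate (min (r + 1) (c + min (n - c) total) - c).toNat (r + 1)
         ++ (PySem.List.pyRange (max c (r + 1)) (c + min (n - c) total) 1).map (fun cc => cc + 1))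
        ++ solRows n (r + 1) 0 (total - min (n - c) total) := by
  rw [solRows]
  rw [if_neg ht, if_neg hcn]

theorem solRows_eq_aux (n : Int) (hn : 1 ≤ n) :
    ∀ (k : Nat) (total r c : Int), total.toNat ≤ k → 0 ≤ c → c < n →
      solRows n r c total = (PySem.List.pyRange (r * n + c) (r * n + c + total) 1).map (gVal n) := by
  intro k
  induction k with
  | zero =>
    intro total r c hk hc0 hc1
    rw [solRows, if_pos (by omega), PySem.List.pyRange_one_eq_nil (by omega), List.map_nil]
  | succ k ih =>
    intro total r c hk hc0 hc1
    by_cases ht : total ≤ 0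
    · rw [solRows, if_pos ht, PySem.List.pyRange_one_eq_nil (by omega), List.map_nil]
    · rw [solRows_step n r c total ht (by omega)]
      set take := min (n - c) total with htake
      have h1 : 1 ≤ take := by omega
      have h2 : take ≤ n - c := by omega
      have h3 : take ≤ total := by omega
      rw [← seg_eq n r c (c + take) hn hc0 (by omega) (by omega)]
      rw [ih (total - take) (r + 1) 0 (by omega) le_rfl (by omega)]
      by_cases hfull : take = n - c
      · rw [show (r + 1) * n + (0 : Int) + (total - take) = r * n + (c + take) + (total - take) from by
            rw [hfull]; ring,
          show (r + 1) * n + (0 : Int) = r * n + (c + take) from by rw [hfull]; ring,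
          show r * n + (c + take) + (total - take) = r * n + c + total from by ring,
          ← List.map_append,
          ← PySem.List.pyRange_one_append (r * n + c) (r * n + (c + take)) (r * n + c + total)
            (by omega) (by omega)]
      · have hteq : take = total := by omega
        rw [show (r + 1) * n + (0 : Int) + (total - take) = (r + 1) * n + 0 from by rw [hteq]; ring]
        rw [PySem.List.pyRange_one_eq_nil (le_refl _), List.map_nil, List.append_nil]
        rw [show r * n + (c + take) = r * n + c + total from by rw [hteq]; ring]

theorem solRows_eq (n : Int) (hn : 1 ≤ n) (total r c : Int) (hc0 : 0 ≤ c) (hc1 : c < n) :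
    solRows n r c total = (PySem.List.pyRange (r * n + c) (r * n + c + total) 1).map (gVal n) :=
  solRows_eq_aux n hn total.toNat total r c le_rfl hc0 hc1

-- ===== VERDICT (by name: the statement is the Claim_ definition above) =====
theorem solution_spec : Claim_equal_solution := by
  intro n left right _ hpre
  unfold Spec_solution solution_alt
  rw [solution_eq_map]
  by_cases h : right < left
  · rw [if_pos h, PySem.List.pyRange_one_eq_nil (by omega), List.map_nil]
  · rw [if_neg h]
    have hn : 1 ≤ n := hpre.resolve_right h
    have hc0 : 0 ≤ PySem.Int.mod left n := PySem.Int.mod_nonneg left (by omega)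
    have hc1 : PySem.Int.mod left n < n := PySem.Int.mod_lt left (by omega)
    have hl : PySem.Int.floordiv left n * n + PySem.Int.mod left n = left :=
      PySem.Int.floordiv_mul_add_mod left n
    rw [solRows_eq n hn (right - left + 1) _ _ hc0 hc1, hl]
    congr 2
    omega
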